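-- pv_equiv track=rewrite | github.com/MIC-DKFZ/ToothSeg | cbctseg/convert_raw_data/label_handling.py | convert_shanks_labels_to_mine
-- ===== SOURCE A (Python) =====
-- def convert_shanks_labels_to_mine(label_text: str, label_int: str):
--     if label_text == 'LOWER_JAW':
--         label_int = 1
--     elif label_text == 'UPPER_JAW':
--         label_int = 2
--     elif label_text == 'DENTAL_IMPLANT':
--         label_int = 3
--     elif label_text == 'NON_TOOTH_SUPPORTED_CROWN':
--         label_int = 4
--     else:
--         # up to 8 teeth per row. oof
--         assert label_int != ''
--         dct = {10 + i: 4 + i for i in range(1, 9)}  # [11 - 18] -> [5 - 12]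
--         dct.update({20 + i: 12 + i for i in range(1, 9)})  # [21 - 28] -> [13 - 20]
--         dct.update({30 + i: 20 + i for i in range(1, 9)})  # [31 - 38] -> [21 - 28]
--         dct.update({40 + i: 28 + i for i in range(1, 9)})  # [41 - 48] -> [29 - 36]
--
--         # in addition some kids got milk teeth. Oof. up to 5 more per row
--         dct.update({50 + i: 36 + i for i in range(1, 6)})
--         dct.update({60 + i: 41 + i for i in range(1, 6)})
--         dct.update({70 + i: 46 + i for i in range(1, 6)})
--         dct.update({80 + i: 51 + i for i in range(1, 6)})
--
--         label_int = dct[int(label_int)]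
--     return label_int
-- ===== SOURCE B (Python) =====
-- def convert_shanks_labels_to_mine(label_text: str, label_int: str):
--     if label_text == 'LOWER_JAW':
--         return 1
--     if label_text == 'UPPER_JAW':
--         return 2
--     if label_text == 'DENTAL_IMPLANT':
--         return 3
--     if label_text == 'NON_TOOTH_SUPPORTED_CROWN':
--         return 4
--     assert label_int != ''
--     n = int(label_int)
--     q, t = divmod(n, 10)
--     if 1 <= q <= 4 and 1 <= t <= 8:        # permanent teeth 11-48 -> 5-36
--         return 4 + 8 * (q - 1) + t
--     if 5 <= q <= 8 and 1 <= t <= 5:        # milk teeth 51-85 -> 37-56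
--         return 36 + 5 * (q - 5) + t
--     raise KeyError(n)
-- ===== Notes on version B (the rewrite author's own statement) =====
-- stated objective: simpler
-- what changed: The 52-entry dictionary built from eight range comprehensions on every call is replaced by a divmod on the tooth code and two closed-form affine formulas; invalid codes still raise KeyError(n).
import Mathlib
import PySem

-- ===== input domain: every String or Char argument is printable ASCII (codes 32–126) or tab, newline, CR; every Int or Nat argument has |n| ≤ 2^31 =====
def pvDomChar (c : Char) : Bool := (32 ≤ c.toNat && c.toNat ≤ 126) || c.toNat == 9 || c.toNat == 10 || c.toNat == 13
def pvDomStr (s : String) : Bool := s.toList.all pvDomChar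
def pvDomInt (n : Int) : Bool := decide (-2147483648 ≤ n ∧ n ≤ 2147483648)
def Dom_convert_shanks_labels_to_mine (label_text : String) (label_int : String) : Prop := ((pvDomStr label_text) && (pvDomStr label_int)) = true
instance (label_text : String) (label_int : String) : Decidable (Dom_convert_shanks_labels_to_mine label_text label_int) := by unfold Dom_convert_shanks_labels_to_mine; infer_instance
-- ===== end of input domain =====

-- B replaces A's per-call 52-entry dictionary with a divmod and two closed-form affine formulas (simpler).


-- ===== PORT A =====
-- A's else branch: build the dict with eight comprehension loops, then look n up.
-- On inputs where Python raises (int() ValueError / KeyError) the port returns 0; Pre_ excludes those.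
def shanksDictLookup (n : Int) : Int :=
  let dct : PySem.Dict Int Int :=
    (PySem.List.pyRange 1 9 1).foldl (fun d i => d.insert (10 + i) (4 + i)) PySem.Dict.empty
  let dct := (PySem.List.pyRange 1 9 1).foldl (fun d i => d.insert (20 + i) (12 + i)) dct
  let dct := (PySem.List.pyRange 1 9 1).foldl (fun d i => d.insert (30 + i) (20 + i)) dct
  let dct := (PySem.List.pyRange 1 9 1).foldl (fun d i => d.insert (40 + i) (28 + i)) dct
  let dct := (PySem.List.pyRange 1 6 1).foldl (fun d i => d.insert (50 + i) (36 + i)) dct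
  let dct := (PySem.List.pyRange 1 6 1).foldl (fun d i => d.insert (60 + i) (41 + i)) dct
  let dct := (PySem.List.pyRange 1 6 1).foldl (fun d i => d.insert (70 + i) (46 + i)) dct
  let dct := (PySem.List.pyRange 1 6 1).foldl (fun d i => d.insert (80 + i) (51 + i)) dct
  (dct.get? n).getD 0

def convert_shanks_labels_to_mine (label_text : String) (label_int : String) : Int :=
  if label_text = "LOWER_JAW" then 1
  else if label_text = "UPPER_JAW" then 2
  else if label_text = "DENTAL_IMPLANT" then 3
  else if label_text = "NON_TOOTH_SUPPORTED_CROWN" then 4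
  else
    match PySem.Int.ofStr? label_int with
    | some n => shanksDictLookup n
    | none => 0

-- ===== PORT B =====
-- B's else branch: divmod and two affine formulas. 0 where Python B raises (excluded by Pre_).
def shanksFormula (n : Int) : Int :=
  let q := PySem.Int.floordiv n 10
  let t := PySem.Int.mod n 10
  if 1 ≤ q ∧ q ≤ 4 ∧ 1 ≤ t ∧ t ≤ 8 then 4 + 8 * (q - 1) + t
  else if 5 ≤ q ∧ q ≤ 8 ∧ 1 ≤ t ∧ t ≤ 5 then 36 + 5 * (q - 5) + t
  else 0

def convert_shanks_labels_to_mine_alt (label_text : String) (label_int : String) : Int :=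
  if label_text = "LOWER_JAW" then 1
  else if label_text = "UPPER_JAW" then 2
  else if label_text = "DENTAL_IMPLANT" then 3
  else if label_text = "NON_TOOTH_SUPPORTED_CROWN" then 4
  else
    match PySem.Int.ofStr? label_int with
    | some n => shanksFormula n
    | none => 0

-- ===== PRECONDITION & SPEC =====
-- The valid tooth codes of A's dictionary.
def shanksCodes : List Int :=
  [11, 12, 13, 14, 15, 16, 17, 18, 21, 22, 23, 24, 25, 26, 27, 28,
   31, 32, 33, 34, 35, 36, 37, 38, 41, 42, 43, 44, 45, 46, 47, 48,
   51, 52, 53, 54, 55, 61, 62, 63, 64, 65, 71, 72, 73, 74, 75, 81, 82, 83, 84, 85]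

-- Pre_ excludes exactly the inputs where A raises: label_text not one of the four jaw labels and
-- label_int not parsing as an int (ValueError / failed assert) or parsing to a code outside the dict (KeyError).
def Pre_convert_shanks_labels_to_mine (label_text : String) (label_int : String) : Prop :=
  label_text = "LOWER_JAW" ∨ label_text = "UPPER_JAW" ∨ label_text = "DENTAL_IMPLANT" ∨
  label_text = "NON_TOOTH_SUPPORTED_CROWN" ∨
  ((PySem.Int.ofStr? label_int).any (fun n => shanksCodes.contains n)) = true
instance (label_text : String) (label_int : String) : Decidable (Pre_convert_shanks_labels_to_mine label_text label_int) := by unfold Pre_convert_shanks_labels_to_mine; infer_instance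

def pvWitness_convert_shanks_labels_to_mine : String × String := ("TOOTH", "11")

def Spec_convert_shanks_labels_to_mine (label_text : String) (label_int : String) (out : Int) : Prop := out = convert_shanks_labels_to_mine_alt label_text label_int
instance (label_text : String) (label_int : String) (out : Int) : Decidable (Spec_convert_shanks_labels_to_mine label_text label_int out) := by unfold Spec_convert_shanks_labels_to_mine; infer_instance

-- ===== CLAIM (what is proved, stated in full; the proofs are below) =====
def Claim_equal_convert_shanks_labels_to_mine : Prop := ∀ (label_text : String) (label_int : String), Dom_convert_shanks_labels_to_mine label_text label_int → Pre_convert_shanks_labels_to_mine label_text label_int → Spec_convert_shanks_labels_to_mine label_text label_int (convert_shanks_labels_to_mine label_text label_int)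

-- ===== LEMMAS AND PROOFS =====
-- On every valid code the dict lookup and the affine formula agree (finite check).
set_option maxRecDepth 20000 in
theorem shanks_body_eq : ∀ n ∈ shanksCodes, shanksDictLookup n = shanksFormula n := by decide

-- ===== VERDICT (by name: the statement is the Claim_ definition above) =====
set_option maxRecDepth 20000 in
theorem convert_shanks_labels_to_mine_spec : Claim_equal_convert_shanks_labels_to_mine := by
  intro lt li _ hpre
  unfold Spec_convert_shanks_labels_to_mine
  unfold convert_shanks_labels_to_mine convert_shanks_labels_to_mine_alt
  split_ifs with h1 h2 h3 h4 <;> try rfl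
  rcases hpre with h | h | h | h | h
  · exact absurd h h1
  · exact absurd h h2
  · exact absurd h h3
  · exact absurd h h4
  · cases hs : PySem.Int.ofStr? li with
    | none => rfl
    | some n =>
      rw [hs] at h
      simp only [Option.any_some] at h
      exact shanks_body_eq n (by simpa using h)
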